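-- pv_equiv track=rewrite | github.com/microsoft/lsprotocol | generator/plugins/dotnet/dotnet_helpers.py | get_usings
-- ===== SOURCE A (Python) =====
-- from typing import List, Optional, Union
--
-- def get_usings(types: List[str]) -> List[str]:
--     usings = []
--
--     for t in ["DataMember", "DataContract"]:
--         if t in types:
--             usings.append("using System.Runtime.Serialization;")
--
--     for t in ["JsonConverter", "JsonConstructor", "JsonProperty", "NullValueHandling"]:
--         if t in types:
--             usings.append("using Newtonsoft.Json;")
--
--     for t in ["JToken", "JObject", "JArray"]:
--         if t in types:
--             usings.append("using Newtonsoft.Json.Linq;")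
--
--     for t in ["List", "Dictionary"]:
--         if t in types:
--             usings.append("using System.Collections.Generic;")
--
--     for t in ["ImmutableArray", "ImmutableDictionary"]:
--         if t in types:
--             usings.append("using System.Collections.Immutable;")
--
--     return sorted(list(set(usings)))
-- ===== SOURCE B (Python) =====
-- NAMESPACE = {
--     "DataMember": "using System.Runtime.Serialization;",
--     "DataContract": "using System.Runtime.Serialization;",
--     "JsonConverter": "using Newtonsoft.Json;",
--     "JsonConstructor": "using Newtonsoft.Json;",
--     "JsonProperty": "using Newtonsoft.Json;",
--     "NullValueHandling": "using Newtonsoft.Json;",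
--     "JToken": "using Newtonsoft.Json.Linq;",
--     "JObject": "using Newtonsoft.Json.Linq;",
--     "JArray": "using Newtonsoft.Json.Linq;",
--     "List": "using System.Collections.Generic;",
--     "Dictionary": "using System.Collections.Generic;",
--     "ImmutableArray": "using System.Collections.Immutable;",
--     "ImmutableDictionary": "using System.Collections.Immutable;",
-- }
--
-- def get_usings(types):
--     return sorted({NAMESPACE[t] for t in types if t in NAMESPACE})
-- ===== Notes on version B (the rewrite author's own statement) =====
-- stated objective: idiomatic
-- what changed: Replaces five fixed keyword-group loops that each scan the input list with a single pass over the input indexing a prebuilt keyword->using-directive table, collecting a set and sorting it.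
import Mathlib
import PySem

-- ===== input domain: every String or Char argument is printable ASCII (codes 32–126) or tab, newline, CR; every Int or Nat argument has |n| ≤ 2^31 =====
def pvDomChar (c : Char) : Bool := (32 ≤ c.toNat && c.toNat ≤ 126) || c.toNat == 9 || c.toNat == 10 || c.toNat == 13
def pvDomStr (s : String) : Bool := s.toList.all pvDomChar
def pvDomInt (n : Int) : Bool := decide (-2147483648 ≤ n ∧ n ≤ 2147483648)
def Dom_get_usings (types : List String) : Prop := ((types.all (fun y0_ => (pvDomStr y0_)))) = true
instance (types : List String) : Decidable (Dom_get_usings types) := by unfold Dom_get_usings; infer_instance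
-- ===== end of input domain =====

-- B replaces A's five fixed keyword-group loops (each scanning the input list) by one pass over
-- the input indexing a prebuilt keyword->directive table; idiomatic, same result.

-- ===== PORT A =====
def get_usings (types : List String) : List String :=
  let usings : List String := []
  let usings := List.foldl (fun acc t => if types.contains t then acc ++ ["using System.Runtime.Serialization;"] else acc) usings ["DataMember", "DataContract"]
  let usings := List.foldl (fun acc t => if types.contains t then acc ++ ["using Newtonsoft.Json;"] else acc) usings ["JsonConverter", "JsonConstructor", "JsonProperty", "NullValueHandling"]
  let usings := List.foldl (fun acc t => if types.contains t then acc ++ ["using Newtonsoft.Json.Linq;"] else acc) usings ["JToken", "JObject", "JArray"]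
  let usings := List.foldl (fun acc t => if types.contains t then acc ++ ["using System.Collections.Generic;"] else acc) usings ["List", "Dictionary"]
  let usings := List.foldl (fun acc t => if types.contains t then acc ++ ["using System.Collections.Immutable;"] else acc) usings ["ImmutableArray", "ImmutableDictionary"]
  PySem.List.sorted (PySem.Set.ofList usings) (fun x => x) false

-- ===== PORT B =====
def NAMESPACE : PySem.Dict String String := PySem.Dict.ofList
  [ ("DataMember", "using System.Runtime.Serialization;"),
    ("DataContract", "using System.Runtime.Serialization;"),
    ("JsonConverter", "using Newtonsoft.Json;"),
    ("JsonConstructor", "using Newtonsoft.Json;"),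
    ("JsonProperty", "using Newtonsoft.Json;"),
    ("NullValueHandling", "using Newtonsoft.Json;"),
    ("JToken", "using Newtonsoft.Json.Linq;"),
    ("JObject", "using Newtonsoft.Json.Linq;"),
    ("JArray", "using Newtonsoft.Json.Linq;"),
    ("List", "using System.Collections.Generic;"),
    ("Dictionary", "using System.Collections.Generic;"),
    ("ImmutableArray", "using System.Collections.Immutable;"),
    ("ImmutableDictionary", "using System.Collections.Immutable;") ]

def get_usings_alt (types : List String) : List String :=
  -- the set comprehension {NAMESPACE[t] for t in types if t in NAMESPACE}
  let s : PySem.Set String :=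
    types.foldl (fun s t => match NAMESPACE.get? t with
                            | some u => PySem.Set.add s u
                            | none => s) PySem.Set.empty
  PySem.List.sorted s (fun x => x) false

-- ===== PRECONDITION & SPEC =====
def Spec_get_usings (types : List String) (out : List String) : Prop := out = get_usings_alt types
instance (types : List String) (out : List String) : Decidable (Spec_get_usings types out) := by unfold Spec_get_usings; infer_instance

-- ===== CLAIM (what is proved, stated in full; the proofs are below) =====
def Claim_equal_get_usings : Prop := ∀ (types : List String), Dom_get_usings types → Spec_get_usings types (get_usings types)

-- ===== LEMMAS AND PROOFS =====

-- the table as a literal association list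
def nsList : List (String × String) :=
  [ ("DataMember", "using System.Runtime.Serialization;"),
    ("DataContract", "using System.Runtime.Serialization;"),
    ("JsonConverter", "using Newtonsoft.Json;"),
    ("JsonConstructor", "using Newtonsoft.Json;"),
    ("JsonProperty", "using Newtonsoft.Json;"),
    ("NullValueHandling", "using Newtonsoft.Json;"),
    ("JToken", "using Newtonsoft.Json.Linq;"),
    ("JObject", "using Newtonsoft.Json.Linq;"),
    ("JArray", "using Newtonsoft.Json.Linq;"),
    ("List", "using System.Collections.Generic;"),
    ("Dictionary", "using System.Collections.Generic;"),
    ("ImmutableArray", "using System.Collections.Immutable;"),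
    ("ImmutableDictionary", "using System.Collections.Immutable;") ]

lemma NAMESPACE_eq : NAMESPACE = PySem.Dict.mk nsList := by decide

lemma nsList_keys_nodup : (nsList.map Prod.fst).Nodup := by decide

-- lookup in a literal dict with distinct keys is association-list membership
lemma get?_mk_eq_some_iff (l : List (String × String)) (h : (l.map Prod.fst).Nodup)
    (t x : String) : (PySem.Dict.mk l).get? t = some x ↔ (t, x) ∈ l := by
  induction l with
  | nil =>
    show (PySem.Dict.empty (κ := String) (ν := String)).get? t = some x ↔ _
    simp [PySem.Dict.get?_empty]
  | cons p ps ih =>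
    obtain ⟨k, v⟩ := p
    rw [PySem.Dict.get?_mk_cons]
    rw [List.map_cons, List.nodup_cons] at h
    obtain ⟨hk, hnd⟩ := h
    by_cases hkt : k = t
    · subst hkt
      rw [if_pos (by simp)]
      constructor
      · intro hsome
        obtain rfl := Option.some.inj hsome
        exact List.mem_cons.2 (Or.inl rfl)
      · intro hm
        rcases List.mem_cons.1 hm with he | hm'
        · have hx : x = v := congrArg Prod.snd he
          rw [hx]
        · exact absurd (List.mem_map.2 ⟨(k, x), hm', rfl⟩) hk
    · rw [if_neg (by simpa using hkt), ih hnd]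
      simp only [List.mem_cons, Prod.mk.injEq]
      constructor
      · exact Or.inr
      · rintro (⟨rfl, rfl⟩ | hm)
        · exact absurd rfl hkt
        · exact hm

-- membership in one of A's group loops
lemma mem_groupFold (types keys : List String) (u x : String) (acc : List String) :
    x ∈ List.foldl (fun acc t => if types.contains t then acc ++ [u] else acc) acc keys
      ↔ x ∈ acc ∨ (x = u ∧ ∃ k ∈ keys, k ∈ types) := by
  induction keys generalizing acc with
  | nil => simp
  | cons k ks ih =>
    simp only [List.foldl_cons]
    by_cases h : types.contains k
    · rw [if_pos h, ih]
      simp only [List.mem_append, List.mem_cons, List.not_mem_nil, or_false]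
      have hk : k ∈ types := by simpa using h
      constructor
      · rintro ((h' | rfl) | ⟨rfl, k', hk', ht⟩)
        · exact Or.inl h'
        · exact Or.inr ⟨rfl, k, Or.inl rfl, hk⟩
        · exact Or.inr ⟨rfl, k', Or.inr hk', ht⟩
      · rintro (h' | ⟨rfl, k', hk' | hk', ht⟩)
        · exact Or.inl (Or.inl h')
        · exact Or.inl (Or.inr rfl)
        · exact Or.inr ⟨rfl, k', hk', ht⟩
    · rw [if_neg h, ih]
      simp only [List.mem_cons]
      constructor
      · rintro (h' | ⟨rfl, k', hk', ht⟩)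
        · exact Or.inl h'
        · exact Or.inr ⟨rfl, k', Or.inr hk', ht⟩
      · rintro (h' | ⟨rfl, k', hk' | hk', ht⟩)
        · exact Or.inl h'
        · subst hk'; exact absurd (by simpa using ht) (by simpa using h)
        · exact Or.inr ⟨rfl, k', hk', ht⟩

-- membership in B's collecting fold
lemma mem_bFold (types : List String) (x : String) (s : PySem.Set String) :
    x ∈ types.foldl (fun s t => match NAMESPACE.get? t with
                                | some u => PySem.Set.add s u
                                | none => s) s
      ↔ x ∈ s ∨ ∃ t ∈ types, NAMESPACE.get? t = some x := by
  induction types generalizing s with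
  | nil => simp
  | cons t ts ih =>
    simp only [List.foldl_cons]
    cases hg : NAMESPACE.get? t with
    | none =>
      rw [ih]
      constructor
      · rintro (h | ⟨t', ht', hv⟩)
        · exact Or.inl h
        · exact Or.inr ⟨t', List.mem_cons_of_mem _ ht', hv⟩
      · rintro (h | ⟨t', ht', hv⟩)
        · exact Or.inl h
        · rcases List.mem_cons.1 ht' with rfl | ht''
          · rw [hg] at hv; cases hv
          · exact Or.inr ⟨t', ht'', hv⟩
    | some u =>
      rw [ih]
      simp only [PySem.Set.mem_add]
      constructor
      · rintro ((h | rfl) | ⟨t', ht', hv⟩)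
        · exact Or.inl h
        · exact Or.inr ⟨t, List.mem_cons_self .., hg⟩
        · exact Or.inr ⟨t', List.mem_cons_of_mem _ ht', hv⟩
      · rintro (h | ⟨t', ht', hv⟩)
        · exact Or.inl (Or.inl h)
        · rcases List.mem_cons.1 ht' with rfl | ht''
          · rw [hg] at hv; exact Or.inl (Or.inr (Option.some.inj hv).symm)
          · exact Or.inr ⟨t', ht'', hv⟩

lemma nodup_bFold (types : List String) (s : PySem.Set String) (hs : s.Nodup) :
    (types.foldl (fun s t => match NAMESPACE.get? t with
                             | some u => PySem.Set.add s u
                             | none => s) s).Nodup := by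
  induction types generalizing s with
  | nil => exact hs
  | cons t ts ih =>
    simp only [List.foldl_cons]
    cases NAMESPACE.get? t with
    | none => exact ih s hs
    | some u => exact ih _ (PySem.Set.nodup_add _ _ hs)

-- ===== VERDICT (by name: the statement is the Claim_ definition above) =====
theorem get_usings_spec : Claim_equal_get_usings := by
  intro types _
  unfold Spec_get_usings get_usings get_usings_alt
  apply PySem.List.sorted_eq_sorted_of_perm _ _ _ (fun a b h => h)
  apply (List.perm_ext_iff_of_nodup (PySem.Set.nodup_ofList _) (nodup_bFold _ _ List.nodup_nil)).2
  intro x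
  rw [PySem.Set.mem_ofList, mem_bFold]
  simp only [mem_groupFold, List.not_mem_nil, false_or]
  have hget : ∀ t : String, (NAMESPACE.get? t = some x) ↔ (t, x) ∈ nsList := by
    intro t; rw [NAMESPACE_eq]; exact get?_mk_eq_some_iff nsList nsList_keys_nodup t x
  simp only [hget, nsList, List.mem_cons, List.not_mem_nil, Prod.mk.injEq]
  constructor
  · rintro ((((⟨rfl, k, hk, ht⟩ | ⟨rfl, k, hk, ht⟩) | ⟨rfl, k, hk, ht⟩) | ⟨rfl, k, hk, ht⟩) | ⟨rfl, k, hk, ht⟩)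
    · exact ⟨k, ht, by rcases hk with rfl | rfl | h0 <;> first | exact h0.elim | simp⟩
    · exact ⟨k, ht, by rcases hk with rfl | rfl | rfl | rfl | h0 <;> first | exact h0.elim | simp⟩
    · exact ⟨k, ht, by rcases hk with rfl | rfl | rfl | h0 <;> first | exact h0.elim | simp⟩
    · exact ⟨k, ht, by rcases hk with rfl | rfl | h0 <;> first | exact h0.elim | simp⟩
    · exact ⟨k, ht, by rcases hk with rfl | rfl | h0 <;> first | exact h0.elim | simp⟩
  · rintro ⟨t, ht, hv⟩
    rcases hv with ⟨rfl,rfl⟩|⟨rfl,rfl⟩|⟨rfl,rfl⟩|⟨rfl,rfl⟩|⟨rfl,rfl⟩|⟨rfl,rfl⟩|⟨rfl,rfl⟩|⟨rfl,rfl⟩|⟨rfl,rfl⟩|⟨rfl,rfl⟩|⟨rfl,rfl⟩|⟨rfl,rfl⟩|⟨rfl,rfl⟩|h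
    · exact Or.inl (Or.inl (Or.inl (Or.inl ⟨rfl, _, by simp, ht⟩)))
    · exact Or.inl (Or.inl (Or.inl (Or.inl ⟨rfl, _, by simp, ht⟩)))
    · exact Or.inl (Or.inl (Or.inl (Or.inr ⟨rfl, _, by simp, ht⟩)))
    · exact Or.inl (Or.inl (Or.inl (Or.inr ⟨rfl, _, by simp, ht⟩)))
    · exact Or.inl (Or.inl (Or.inl (Or.inr ⟨rfl, _, by simp, ht⟩)))
    · exact Or.inl (Or.inl (Or.inl (Or.inr ⟨rfl, _, by simp, ht⟩)))
    · exact Or.inl (Or.inl (Or.inr ⟨rfl, _, by simp, ht⟩))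
    · exact Or.inl (Or.inl (Or.inr ⟨rfl, _, by simp, ht⟩))
    · exact Or.inl (Or.inl (Or.inr ⟨rfl, _, by simp, ht⟩))
    · exact Or.inl (Or.inr ⟨rfl, _, by simp, ht⟩)
    · exact Or.inl (Or.inr ⟨rfl, _, by simp, ht⟩)
    · exact Or.inr ⟨rfl, _, by simp, ht⟩
    · exact Or.inr ⟨rfl, _, by simp, ht⟩
    · cases h
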